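-- pv_equiv track=rewrite | github.com/NoahSimon8/TheCoderSchoolWork | DataStructures/Time-Complexity/Smart_Coding/LongestPalendrome.py | checkPalendromeOdd
-- ===== SOURCE A (Python) =====
-- def checkPalendromeOdd(string,x,y,length=1):
--     if x != 0 and y != len(string)-1:
--         if string[x-1] == string[y+1]:
--             length += 2
--             return checkPalendromeOdd(string,x-1,y+1,length)
--         else:
--             return length
--     else:
--         return length
-- ===== SOURCE B (Python) =====
-- def checkPalendromeOdd(string, x, y, length=1):
--     # Pair up the characters left of x (walking leftwards) with those
--     # right of y (walking rightwards) and extend while they match.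
--     for left, right in zip(reversed(string[:x]), string[y+1:]):
--         if left != right:
--             return length
--         length += 2
--     return length
-- ===== Notes on version B (the rewrite author's own statement) =====
-- stated objective: simpler
-- what changed: The tail recursion with explicit index arithmetic and a two-sided boundary guard is replaced by a single zip over two slices (the reversed prefix before x and the suffix after y), whose lengths realise the boundary guard, with one linear scan counting matching pairs.
-- outside the precondition, e.g. on checkPalendromeOdd('aaa', 2, -2, 1): A returns 5, B returns 3; on checkPalendromeOdd('a', 1, 5, 1): A raises IndexError, B returns 1
import Mathlib
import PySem

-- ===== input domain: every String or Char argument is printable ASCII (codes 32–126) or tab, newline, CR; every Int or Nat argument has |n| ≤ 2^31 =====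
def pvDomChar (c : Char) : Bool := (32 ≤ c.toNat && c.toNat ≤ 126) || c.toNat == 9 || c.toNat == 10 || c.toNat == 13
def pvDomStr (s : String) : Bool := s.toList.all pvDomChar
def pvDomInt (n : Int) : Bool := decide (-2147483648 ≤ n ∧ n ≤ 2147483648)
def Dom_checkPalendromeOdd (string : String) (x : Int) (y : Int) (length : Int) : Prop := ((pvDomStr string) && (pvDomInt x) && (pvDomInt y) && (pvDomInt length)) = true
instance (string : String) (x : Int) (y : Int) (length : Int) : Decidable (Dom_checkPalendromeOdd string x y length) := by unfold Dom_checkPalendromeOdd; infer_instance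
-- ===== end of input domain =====

-- B replaces A's tail recursion over explicit indices by one zip of the reversed prefix
-- before x with the suffix after y (simpler); equivalence proved on Pre_ (in-range or
-- immediately-returning indices): outside it A raises IndexError or reads wrapped-around
-- negative indices, an artefact of Python indexing B's clamped slices do not reproduce.


-- ===== PORT A =====
-- A's recursion, on the code points. The `| _, _ => 0` arm is Python's IndexError
-- (pyGet? = none); Pre_ excludes those inputs.
def pvALoop (s : List Char) (x : Int) (y : Int) (length : Int) : Int :=
  if x ≠ 0 ∧ y ≠ (s.length : Int) - 1 then
    match h1 : PySem.List.pyGet? s (x - 1), h2 : PySem.List.pyGet? s (y + 1) with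
    | some a, some b =>
        if a = b then pvALoop s (x - 1) (y + 1) (length + 2) else length
    | _, _ => 0
  else length
termination_by ((s.length : Int) - 1 - y).toNat
decreasing_by
  have : ¬ (PySem.List.pyGet? s (y + 1) = none) := by simp [h2]
  rw [PySem.List.pyGet?_eq_none_iff] at this
  unfold PySem.Raise.InRange at this
  omega

def checkPalendromeOdd (string : String) (x : Int) (y : Int) (length : Int) : Int :=
  pvALoop string.toList x y length

-- ===== PORT B =====
-- B's loop: `for left, right in zip(reversed(string[:x]), string[y+1:])`.
def pvBLoop : List (Char × Char) → Int → Int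
  | [], length => length
  | (left, right) :: rest, length =>
      if left = right then pvBLoop rest (length + 2) else length

def checkPalendromeOdd_alt (string : String) (x : Int) (y : Int) (length : Int) : Int :=
  pvBLoop (List.zip ((PySem.List.slice string.toList none (some x)).reverse)
                    (PySem.List.slice string.toList (some (y + 1)) none)) length

-- ===== PRECONDITION & SPEC =====
-- Pre_ excludes the inputs on which A's raw indexing raises IndexError, and those with
-- y < -1 on which A silently reads wrapped-around negative indices (an artefact of A's
-- implementation that B's clamped slices do not reproduce); it keeps the guard cases
-- (x = 0, y = len-1), the in-range indices, the two wraparound regions (negative x with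
-- -1 <= x+y; negative y with x+y <= -2) where A's wraparound provably coincides with B,
-- and the inputs whose very first compared pair of characters already differs (both
-- programs return length at once).
def Pre_checkPalendromeOdd (string : String) (x : Int) (y : Int) (length : Int) : Prop :=
  x = 0 ∨ y = (PySem.Str.len string) - 1 ∨
    (0 ≤ x ∧ x ≤ PySem.Str.len string ∧ -1 ≤ y ∧ y < PySem.Str.len string) ∨
    (-(PySem.Str.len string) ≤ x ∧ x < 0 ∧ -1 ≤ y ∧ y < PySem.Str.len string ∧ -1 ≤ x + y) ∨
    (0 ≤ x ∧ x ≤ PySem.Str.len string ∧ -(PySem.Str.len string) ≤ y + 1 ∧ x + y + 1 < 0) ∨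
    (x ≠ 0 ∧ y ≠ PySem.Str.len string - 1 ∧
      -(PySem.Str.len string) ≤ x - 1 ∧ x - 1 < PySem.Str.len string ∧
      -(PySem.Str.len string) ≤ y + 1 ∧ y + 1 < PySem.Str.len string ∧
      PySem.List.pyGet? string.toList (x - 1) ≠ PySem.List.pyGet? string.toList (y + 1))
instance (string : String) (x : Int) (y : Int) (length : Int) : Decidable (Pre_checkPalendromeOdd string x y length) := by unfold Pre_checkPalendromeOdd; infer_instance

def pvWitness_checkPalendromeOdd : String × Int × Int × Int := ("racecar", 3, 3, 1)

def Spec_checkPalendromeOdd (string : String) (x : Int) (y : Int) (length : Int) (out : Int) : Prop := out = checkPalendromeOdd_alt string x y length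
instance (string : String) (x : Int) (y : Int) (length : Int) (out : Int) : Decidable (Spec_checkPalendromeOdd string x y length out) := by unfold Spec_checkPalendromeOdd; infer_instance

-- ===== CLAIM (what is proved, stated in full; the proofs are below) =====
def Claim_equal_checkPalendromeOdd : Prop := ∀ (string : String) (x : Int) (y : Int) (length : Int), Dom_checkPalendromeOdd string x y length → Pre_checkPalendromeOdd string x y length → Spec_checkPalendromeOdd string x y length (checkPalendromeOdd string x y length)

-- ===== LEMMAS AND PROOFS =====

-- The core invariant for 0 ≤ x ≤ len: A's recursion computes exactly B's scan over
-- zip (reversed prefix of length x) (suffix from y+1).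
lemma pvLoop_eq (s : List Char) : ∀ (n : Nat) (y length : Int),
    (n : Int) ≤ s.length → -1 ≤ y → y < s.length →
    pvALoop s (n : Int) y length
      = pvBLoop (List.zip ((s.take n).reverse) (s.drop (y + 1).toNat)) length := by
  intro n
  induction n with
  | zero =>
    intro y length _ _ _
    rw [pvALoop]
    simp [pvBLoop]
  | succ n ih =>
    intro y length hx hy0 hy
    by_cases hyl : y = (s.length : Int) - 1
    · rw [pvALoop]
      simp [hyl, pvBLoop]
    · have hn : n < s.length := by omega
      have hk : (y + 1).toNat < s.length := by omega
      have hki : ((y + 1).toNat : Int) = y + 1 := by omega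
      rw [pvALoop]
      have hx1 : (((n + 1 : Nat) : Int)) - 1 = (n : Int) := by push_cast; ring
      have hg1 : PySem.List.pyGet? s ((((n + 1 : Nat) : Int)) - 1) = some s[n] := by
        rw [hx1, PySem.List.pyGet?_natCast]
        simp [hn]
      have hg2 : PySem.List.pyGet? s (y + 1) = some s[(y + 1).toNat] := by
        rw [PySem.List.pyGet?_of_nonneg s (by omega)]
        simp [hk]
      have htake : (s.take (n + 1)).reverse = s[n] :: (s.take n).reverse := by
        rw [List.take_add_one]
        simp [hn]
      have hdrop : s.drop (y + 1).toNat = s[(y + 1).toNat] :: s.drop ((y + 1).toNat + 1) := by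
        exact List.drop_eq_getElem_cons hk
      have hguard : (((n + 1 : Nat) : Int)) ≠ 0 ∧ y ≠ (s.length : Int) - 1 := ⟨by push_cast; omega, hyl⟩
      rw [if_pos hguard, hg1, hg2]
      rw [htake, hdrop]
      simp only [List.zip_cons_cons, pvBLoop]
      by_cases heq : s[n] = s[(y + 1).toNat]
      · rw [if_pos heq, if_pos heq, hx1]
        have h2 : ((y + 1) + 1).toNat = (y + 1).toNat + 1 := by omega
        rw [← h2]
        exact ih (y + 1) (length + 2) (by omega) (by omega) (by omega)
      · rw [if_neg heq, if_neg heq]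

-- The core invariant for -len ≤ x < 0 with -1 ≤ x + y: A's negative indices wrap to
-- exactly the elements of B's clamped prefix slice (of length len + x), and a mismatch
-- or the y-guard stops the recursion before the prefix is exhausted.
lemma pvLoop_eq_neg (s : List Char) : ∀ (k : Nat) (x length : Int),
    x < 0 → (k : Int) ≤ (s.length : Int) + x →
    pvALoop s x ((s.length : Int) - 1 - (k : Int)) length
      = pvBLoop (List.zip ((s.take ((s.length : Int) + x).toNat).reverse)
                          (s.drop (s.length - k))) length := by
  intro k
  induction k with
  | zero =>
    intro x length hx hk
    rw [pvALoop]
    simp [pvBLoop]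
  | succ k ih =>
    intro x length hx hk
    have hL : (k : Int) + 1 ≤ (s.length : Int) + x := by push_cast at hk ⊢; omega
    obtain ⟨N, hN⟩ : ∃ N : Nat, ((s.length : Int) + x).toNat = N + 1 :=
      ⟨((s.length : Int) + x).toNat - 1, by omega⟩
    have hNs : N < s.length := by omega
    have hguard : x ≠ 0 ∧ (s.length : Int) - 1 - ((k : Nat) + 1 : Nat) ≠ (s.length : Int) - 1 := by
      constructor
      · omega
      · push_cast; omega
    rw [pvALoop, if_pos hguard, hN]
    have hg1 : PySem.List.pyGet? s (x - 1) = some s[N] := by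
      have hx1 : x - 1 = -(((1 - x).toNat : Nat) : Int) := by omega
      rw [hx1, PySem.List.pyGet?_neg_natCast s (1 - x).toNat (by omega) (by omega)]
      have : s.length - (1 - x).toNat = N := by omega
      rw [this]
      simp [hNs]
    have hyk : (s.length : Int) - 1 - ((k : Nat) + 1 : Nat) + 1 = ((s.length - (k + 1) : Nat) : Int) := by
      push_cast; omega
    have hg2 : PySem.List.pyGet? s ((s.length : Int) - 1 - ((k : Nat) + 1 : Nat) + 1)
        = some s[s.length - (k + 1)] := by
      rw [hyk, PySem.List.pyGet?_natCast]
      simp [show s.length - (k + 1) < s.length by omega]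
    rw [hg1, hg2]
    have htake : (s.take (N + 1)).reverse = s[N] :: (s.take N).reverse := by
      rw [List.take_add_one]
      simp [hNs]
    have hdrop : s.drop (s.length - (k + 1))
        = s[s.length - (k + 1)] :: s.drop ((s.length - (k + 1)) + 1) := by
      exact List.drop_eq_getElem_cons (by omega)
    rw [htake, hdrop]
    simp only [List.zip_cons_cons, pvBLoop]
    by_cases heq : s[N] = s[s.length - (k + 1)]
    · rw [if_pos heq, if_pos heq]
      have e1 : (s.length : Int) - 1 - ((k : Nat) + 1 : Nat) + 1 = (s.length : Int) - 1 - (k : Nat) := by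
        push_cast; omega
      have e2 : ((s.length : Int) + (x - 1)).toNat = N := by omega
      have e3 : s.length - (k + 1) + 1 = s.length - k := by omega
      rw [e1, e3, ← e2]
      exact ih (x - 1) (length + 2) (by omega) (by omega)
    · rw [if_neg heq, if_neg heq]

-- The core invariant for 0 ≤ x ≤ len with x + y ≤ -2: A's wrapped negative right-side
-- reads coincide with B's clamped suffix slice, and the x-guard stops the recursion at
-- x = 0, exactly where B's prefix slice is exhausted.
lemma pvLoop_eq_negy (s : List Char) : ∀ (n : Nat) (y length : Int),
    (n : Int) ≤ s.length → -(s.length : Int) - 1 ≤ y → (n : Int) + y ≤ -2 →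
    pvALoop s (n : Int) y length
      = pvBLoop (List.zip ((s.take n).reverse) (s.drop ((s.length : Int) + y + 1).toNat)) length := by
  intro n
  induction n with
  | zero =>
    intro y length _ _ _
    rw [pvALoop]
    simp [pvBLoop]
  | succ n ih =>
    intro y length hn hyL hxy
    have hn' : n < s.length := by omega
    have hyneg : y + 1 < 0 := by push_cast at hxy; omega
    have hK : ((s.length : Int) + y + 1).toNat < s.length := by omega
    have hguard : (((n + 1 : Nat) : Int)) ≠ 0 ∧ y ≠ (s.length : Int) - 1 := by
      constructor
      · push_cast; omega
      · omega
    rw [pvALoop, if_pos hguard]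
    have hx1 : (((n + 1 : Nat) : Int)) - 1 = (n : Int) := by push_cast; ring
    have hg1 : PySem.List.pyGet? s ((((n + 1 : Nat) : Int)) - 1) = some s[n] := by
      rw [hx1, PySem.List.pyGet?_natCast]
      simp [hn']
    have hg2 : PySem.List.pyGet? s (y + 1) = some s[((s.length : Int) + y + 1).toNat] := by
      have hy1 : y + 1 = -(((-(y + 1)).toNat : Nat) : Int) := by omega
      rw [hy1, PySem.List.pyGet?_neg_natCast s (-(y + 1)).toNat (by omega) (by omega)]
      have : s.length - (-(y + 1)).toNat = ((s.length : Int) + y + 1).toNat := by omega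
      rw [this]
      simp [hK]
    have htake : (s.take (n + 1)).reverse = s[n] :: (s.take n).reverse := by
      rw [List.take_add_one]
      simp [hn']
    have hdrop : s.drop ((s.length : Int) + y + 1).toNat
        = s[((s.length : Int) + y + 1).toNat] :: s.drop (((s.length : Int) + y + 1).toNat + 1) := by
      exact List.drop_eq_getElem_cons hK
    rw [hg1, hg2, htake, hdrop]
    simp only [List.zip_cons_cons, pvBLoop]
    by_cases heq : s[n] = s[((s.length : Int) + y + 1).toNat]
    · rw [if_pos heq, if_pos heq, hx1]
      have e1 : ((s.length : Int) + (y + 1) + 1).toNat = ((s.length : Int) + y + 1).toNat + 1 := by omega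
      rw [← e1]
      exact ih (y + 1) (length + 2) (by omega) (by omega) (by omega)
    · rw [if_neg heq, if_neg heq]

lemma pvALoop_x_zero (s : List Char) (y length : Int) : pvALoop s 0 y length = length := by
  rw [pvALoop]; simp

lemma pvALoop_y_last (s : List Char) (x length : Int) :
    pvALoop s x ((s.length : Int) - 1) length = length := by
  rw [pvALoop]; simp

-- Heads of B's two slices, for the first-comparison-mismatch region: the first element
-- of the reversed prefix is exactly A's (possibly wrapped) read at x-1, and the first
-- element of the suffix is A's read at y+1.
lemma pvHeadL (s : List Char) (x : Int) (a : Char) (hx : x ≠ 0)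
    (h1 : -(s.length : Int) ≤ x - 1) (h2 : x - 1 < (s.length : Int))
    (ha : PySem.List.pyGet? s (x - 1) = some a) :
    ∃ t, (PySem.List.slice s none (some x)).reverse = a :: t := by
  by_cases hpos : 0 < x
  · obtain ⟨N, hN⟩ : ∃ N : Nat, x.toNat = N + 1 := ⟨x.toNat - 1, by omega⟩
    have hNs : N < s.length := by omega
    have ha' : a = s[N] := by
      rw [PySem.List.pyGet?_of_nonneg s (by omega)] at ha
      have : (x - 1).toNat = N := by omega
      rw [this] at ha
      simpa [hNs] using ha.symm
    refine ⟨(s.take N).reverse, ?_⟩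
    rw [PySem.List.slice_to s (by omega), hN, List.take_add_one, ha']
    simp [hNs]
  · have hneg : x < 0 := by omega
    obtain ⟨N, hN⟩ : ∃ N : Nat, ((s.length : Int) + x).toNat = N + 1 :=
      ⟨((s.length : Int) + x).toNat - 1, by omega⟩
    have hNs : N < s.length := by omega
    have ha' : a = s[N] := by
      have hx1 : x - 1 = -(((1 - x).toNat : Nat) : Int) := by omega
      rw [hx1, PySem.List.pyGet?_neg_natCast s (1 - x).toNat (by omega) (by omega)] at ha
      have : s.length - (1 - x).toNat = N := by omega
      rw [this, List.getElem?_eq_getElem hNs] at ha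
      exact (Option.some.inj ha).symm
    refine ⟨(s.take N).reverse, ?_⟩
    have hx2 : x = -((((-x).toNat : Nat)) : Int) := by omega
    rw [hx2, PySem.List.slice_to_neg_natCast s (-x).toNat (by omega)]
    have : s.length - (-x).toNat = N + 1 := by omega
    rw [this, List.take_add_one, ha']
    simp [hNs]

lemma pvHeadR (s : List Char) (y : Int) (b : Char)
    (h1 : -(s.length : Int) ≤ y + 1) (h2 : y + 1 < (s.length : Int))
    (hb : PySem.List.pyGet? s (y + 1) = some b) :
    ∃ t, PySem.List.slice s (some (y + 1)) = b :: t := by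
  by_cases hpos : 0 ≤ y + 1
  · have hk : (y + 1).toNat < s.length := by omega
    have hb' : b = s[(y + 1).toNat] := by
      rw [PySem.List.pyGet?_of_nonneg s hpos] at hb
      simpa [hk] using hb.symm
    refine ⟨s.drop ((y + 1).toNat + 1), ?_⟩
    rw [PySem.List.slice_from s hpos, hb']
    exact List.drop_eq_getElem_cons hk
  · obtain ⟨k, hk0⟩ : ∃ k : Nat, (k : Int) = -(y + 1) := ⟨(-(y + 1)).toNat, by omega⟩
    have hk : s.length - k < s.length := by omega
    have hb' : b = s[s.length - k] := by
      have hy1 : y + 1 = -((k : Nat) : Int) := by omega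
      rw [hy1, PySem.List.pyGet?_neg_natCast s k (by omega) (by omega),
          List.getElem?_eq_getElem hk] at hb
      exact (Option.some.inj hb).symm
    refine ⟨s.drop ((s.length - k) + 1), ?_⟩
    have hy1 : y + 1 = -((k : Nat) : Int) := by omega
    rw [PySem.List.slice_some_none, hy1,
        PySem.List.clampIdx_neg_natCast s.length k (by omega), hb']
    exact List.drop_eq_getElem_cons hk

-- ===== VERDICT (by name: the statement is the Claim_ definition above) =====
theorem checkPalendromeOdd_spec : Claim_equal_checkPalendromeOdd := by
  intro string x y length _ hpre
  unfold Spec_checkPalendromeOdd checkPalendromeOdd checkPalendromeOdd_alt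
  set s := string.toList with hs
  have hlen : PySem.Str.len string = (s.length : Int) := by
    simp [PySem.Str.len_eq, hs]
  rcases hpre with hx0 | hyl | ⟨hx0, hxl, hy0, hyl⟩ | ⟨hxm, hx0, hy0, hyl, hxy⟩ | ⟨hx0, hxl, hym, hxy⟩ | ⟨hx0, hyl, hb1, hb2, hb3, hb4, hne⟩
  · -- x = 0 : both sides return length immediately (empty left slice).
    subst hx0
    rw [pvALoop_x_zero]
    rw [PySem.List.slice_to s le_rfl]
    simp [pvBLoop]
  · -- y = len - 1 : both sides return length immediately (empty right slice).
    rw [hlen] at hyl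
    subst hyl
    rw [pvALoop_y_last]
    rw [PySem.List.slice_from s (by omega)]
    have : ((s.length : Int) - 1 + 1).toNat = s.length := by omega
    rw [this]
    simp [pvBLoop]
  · -- 0 ≤ x ≤ len and -1 ≤ y < len: the nonnegative main lemma.
    rw [hlen] at hxl hyl
    rw [PySem.List.slice_to s hx0, PySem.List.slice_from s (by omega)]
    have hx : x = ((x.toNat : Nat) : Int) := by omega
    rw [hx]
    exact pvLoop_eq s x.toNat y length (by omega) hy0 hyl
  · -- -len ≤ x < 0 with -1 ≤ x + y: the negative-x main lemma.
    rw [hlen] at hxm hyl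
    have hx1 : x = -(((-x).toNat : Nat) : Int) := by omega
    rw [hx1, PySem.List.slice_to_neg_natCast s (-x).toNat (by omega), PySem.List.slice_from s (by omega)]
    have e1 : s.length - (-x).toNat = ((s.length : Int) + x).toNat := by omega
    have e2 : (y + 1).toNat = s.length - ((s.length : Int) - 1 - y).toNat := by omega
    have e3 : y = (s.length : Int) - 1 - (((s.length : Int) - 1 - y).toNat : Int) := by omega
    rw [e1, e2, ← hx1]
    calc pvALoop s x y length
        = pvALoop s x ((s.length : Int) - 1 - (((s.length : Int) - 1 - y).toNat : Int)) length := by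
          rw [← e3]
      _ = _ := pvLoop_eq_neg s ((s.length : Int) - 1 - y).toNat x length (by omega) (by omega)
  · -- 0 ≤ x ≤ len with x + y ≤ -2: the negative-y main lemma.
    rw [hlen] at hxl hym
    rw [PySem.List.slice_to s hx0, PySem.List.slice_some_none]
    have hy1 : y + 1 = -(((-(y + 1)).toNat : Nat) : Int) := by omega
    rw [hy1, PySem.List.clampIdx_neg_natCast s.length (-(y + 1)).toNat (by omega)]
    have e1 : s.length - (-(y + 1)).toNat = ((s.length : Int) + y + 1).toNat := by omega
    have hx : x = ((x.toNat : Nat) : Int) := by omega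
    rw [e1, hx]
    exact pvLoop_eq_negy s x.toNat y length (by omega) (by omega) (by omega)
  · -- the very first comparison mismatches: both programs return length at once.
    rw [hlen] at hyl hb1 hb2 hb3 hb4
    rw [← hs] at hne
    have h1 : ¬ (PySem.List.pyGet? s (x - 1) = none) := by
      simp only [PySem.List.pyGet?_eq_none_iff, not_not]
      unfold PySem.Raise.InRange
      omega
    have h2 : ¬ (PySem.List.pyGet? s (y + 1) = none) := by
      simp only [PySem.List.pyGet?_eq_none_iff, not_not]
      unfold PySem.Raise.InRange
      omega
    obtain ⟨a, ha⟩ := Option.ne_none_iff_exists'.mp h1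
    obtain ⟨b, hb⟩ := Option.ne_none_iff_exists'.mp h2
    have hab : a ≠ b := by
      intro h
      exact hne (by rw [ha, hb, h])
    obtain ⟨t1, ht1⟩ := pvHeadL s x a hx0 hb1 hb2 ha
    obtain ⟨t2, ht2⟩ := pvHeadR s y b hb3 hb4 hb
    rw [pvALoop, if_pos ⟨hx0, hyl⟩, ha, hb, ht1, ht2]
    simp [pvBLoop, hab]
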